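-- pv_equiv track=rewrite | github.com/researchartifacts/artifact_analysis | generate_committee_stats.py | _aggregate_across_conferences
-- ===== SOURCE A (Python) =====
-- from collections import defaultdict
--
-- def _aggregate_across_conferences(per_conf, conf_to_area):
--     """Aggregate per-conference-year dicts into overall + per-area totals.
--
--     Parameters
--     ----------
--     per_conf : dict
--         {conf_year: {key: count}}
--     conf_to_area : dict
--         {conf_year: 'systems' | 'security'}
--
--     Returns
--     -------
--     (overall, systems, security) — each is {key: total_count}
--     """
--     overall = defaultdict(int)
--     systems = defaultdict(int)
--     security = defaultdict(int)
--     for conf_year, counts in per_conf.items():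
--         area = conf_to_area.get(conf_year, 'unknown')
--         for key, count in counts.items():
--             overall[key] += count
--             if area == 'systems':
--                 systems[key] += count
--             elif area == 'security':
--                 security[key] += count
--     return dict(overall), dict(systems), dict(security)
-- ===== SOURCE B (Python) =====
-- def _aggregate_across_conferences(per_conf, conf_to_area):
--     """Partition conf_years into area buckets first, then merge each bucket
--     of count-dicts with a separate pass (vs A's single flat loop with an
--     inner branch)."""
--     def area_of(cy):
--         return conf_to_area.get(cy, 'unknown')
--
--     def merge(dicts):
--         tot = {}
--         for d in dicts:
--             for k, v in d.items():
--                 tot[k] = tot.get(k, 0) + v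
--         return tot
--
--     all_counts = list(per_conf.values())
--     systems_counts = [c for cy, c in per_conf.items() if area_of(cy) == 'systems']
--     security_counts = [c for cy, c in per_conf.items() if area_of(cy) == 'security']
--     return merge(all_counts), merge(systems_counts), merge(security_counts)
-- ===== Notes on version B (the rewrite author's own statement) =====
-- stated objective: alternative
-- what changed: B first partitions the conference-years into per-area buckets and then merges each bucket of count-dicts with its own independent pass, instead of A's single flat loop that updates three accumulators with an inner area branch.
import Mathlib
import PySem

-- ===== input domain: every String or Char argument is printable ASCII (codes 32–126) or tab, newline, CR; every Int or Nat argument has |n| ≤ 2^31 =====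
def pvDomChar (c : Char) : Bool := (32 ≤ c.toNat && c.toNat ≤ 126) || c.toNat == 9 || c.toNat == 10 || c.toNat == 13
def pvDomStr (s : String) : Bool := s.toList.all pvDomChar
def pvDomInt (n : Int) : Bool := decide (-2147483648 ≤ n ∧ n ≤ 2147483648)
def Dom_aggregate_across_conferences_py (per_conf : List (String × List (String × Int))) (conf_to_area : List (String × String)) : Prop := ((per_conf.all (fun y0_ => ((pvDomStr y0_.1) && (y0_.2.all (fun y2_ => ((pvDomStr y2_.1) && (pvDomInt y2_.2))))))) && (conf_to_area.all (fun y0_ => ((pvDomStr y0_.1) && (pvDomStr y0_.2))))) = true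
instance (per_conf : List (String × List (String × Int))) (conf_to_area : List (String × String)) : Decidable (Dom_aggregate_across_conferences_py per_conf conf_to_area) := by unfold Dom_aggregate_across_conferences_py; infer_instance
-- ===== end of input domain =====

-- B partitions the conference-years into per-area buckets first and merges each bucket in its own
-- pass, instead of A's single flat loop with an inner area branch; same cost, different decomposition.

-- ===== PORT A =====
-- one iteration of A's inner 'for key, count in counts.items()' loop over the three accumulators
def aggStep (area : String)
    (t : PySem.Dict String Int × PySem.Dict String Int × PySem.Dict String Int)
    (kv : String × Int) :
    PySem.Dict String Int × PySem.Dict String Int × PySem.Dict String Int :=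
  (t.1.modify kv.1 0 (· + kv.2),
   if area == "systems" then t.2.1.modify kv.1 0 (· + kv.2) else t.2.1,
   if area == "security" then t.2.2.modify kv.1 0 (· + kv.2) else t.2.2)

def aggregate_across_conferences_py (per_conf : List (String × List (String × Int))) (conf_to_area : List (String × String)) : (List (String × Int)) × (List (String × Int)) × (List (String × Int)) :=
  let r := per_conf.foldl
    (fun t p =>
      let area := (PySem.Dict.mk conf_to_area).getD p.1 "unknown"
      p.2.foldl (aggStep area) t)
    (PySem.Dict.empty, PySem.Dict.empty, PySem.Dict.empty)
  (r.1.items, r.2.1.items, r.2.2.items)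

-- ===== PORT B =====
-- merge's inner loop: tot[k] = tot.get(k, 0) + v
def pvMergeInto (t : PySem.Dict String Int) (d : List (String × Int)) : PySem.Dict String Int :=
  d.foldl (fun t kv => t.insert kv.1 (t.getD kv.1 0 + kv.2)) t

def pvMerge (ds : List (List (String × Int))) : List (String × Int) :=
  (ds.foldl pvMergeInto PySem.Dict.empty).items

def aggregate_across_conferences_py_alt (per_conf : List (String × List (String × Int))) (conf_to_area : List (String × String)) : (List (String × Int)) × (List (String × Int)) × (List (String × Int)) :=
  let areaOf := fun cy => (PySem.Dict.mk conf_to_area).getD cy "unknown"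
  (pvMerge (per_conf.map (·.2)),
   pvMerge ((per_conf.filter (fun p => areaOf p.1 == "systems")).map (·.2)),
   pvMerge ((per_conf.filter (fun p => areaOf p.1 == "security")).map (·.2)))

-- ===== PRECONDITION & SPEC =====
def Spec_aggregate_across_conferences_py (per_conf : List (String × List (String × Int))) (conf_to_area : List (String × String)) (out : (List (String × Int)) × (List (String × Int)) × (List (String × Int))) : Prop := out = aggregate_across_conferences_py_alt per_conf conf_to_area
instance (per_conf : List (String × List (String × Int))) (conf_to_area : List (String × String)) (out : (List (String × Int)) × (List (String × Int)) × (List (String × Int))) : Decidable (Spec_aggregate_across_conferences_py per_conf conf_to_area out) := by unfold Spec_aggregate_across_conferences_py; infer_instance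

-- ===== CLAIM (what is proved, stated in full; the proofs are below) =====
def Claim_equal_aggregate_across_conferences_py : Prop := ∀ (per_conf : List (String × List (String × Int))) (conf_to_area : List (String × String)), Dom_aggregate_across_conferences_py per_conf conf_to_area → Spec_aggregate_across_conferences_py per_conf conf_to_area (aggregate_across_conferences_py per_conf conf_to_area)

-- ===== LEMMAS AND PROOFS =====

-- defaultdict's 'd[k] += v' and plain dict's 'd[k] = d.get(k, 0) + v' are the same update
lemma modify_add_eq_insert (d : PySem.Dict String Int) (k : String) (v : Int) :
    d.modify k 0 (· + v) = d.insert k (d.getD k 0 + v) := rfl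

-- one conference: A's triple-accumulator inner loop acts componentwise
lemma inner_triple (area : String) (counts : List (String × Int))
    (o s c : PySem.Dict String Int) :
    counts.foldl (aggStep area) (o, s, c)
      = (pvMergeInto o counts,
         if area == "systems" then pvMergeInto s counts else s,
         if area == "security" then pvMergeInto c counts else c) := by
  induction counts generalizing o s c with
  | nil => simp [pvMergeInto]
  | cons kv rest ih =>
      by_cases hs : area == "systems" <;> by_cases hc : area == "security" <;>
        simp [List.foldl_cons, aggStep, ih, pvMergeInto, hs, hc, modify_add_eq_insert]

-- A's outer loop equals B's three bucketed merges, from arbitrary accumulators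
lemma agg_fold (cta : List (String × String)) (l : List (String × List (String × Int)))
    (o s c : PySem.Dict String Int) :
    l.foldl (fun t p =>
        let area := (PySem.Dict.mk cta).getD p.1 "unknown"
        p.2.foldl (aggStep area) t) (o, s, c)
      = ((l.map (·.2)).foldl pvMergeInto o,
         ((l.filter (fun p => (PySem.Dict.mk cta).getD p.1 "unknown" == "systems")).map (·.2)).foldl pvMergeInto s,
         ((l.filter (fun p => (PySem.Dict.mk cta).getD p.1 "unknown" == "security")).map (·.2)).foldl pvMergeInto c) := by
  induction l generalizing o s c with
  | nil => simp
  | cons p rest ih =>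
      simp only [List.foldl_cons, inner_triple]
      by_cases hs : (PySem.Dict.mk cta).getD p.1 "unknown" == "systems" <;>
        by_cases hc : (PySem.Dict.mk cta).getD p.1 "unknown" == "security" <;>
          simp [ih, hs, hc]

-- ===== VERDICT (by name: the statement is the Claim_ definition above) =====
theorem aggregate_across_conferences_py_spec : Claim_equal_aggregate_across_conferences_py := by
  intro per_conf conf_to_area _
  unfold Spec_aggregate_across_conferences_py aggregate_across_conferences_py
    aggregate_across_conferences_py_alt pvMerge
  simp only [agg_fold]
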